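-- pv_equiv track=rewrite | github.com/cyberAlpha1/binarlauki | binarlauki.py | jumis
-- ===== SOURCE A (Python) =====
-- f = '#'
--
-- e = ' '
--
-- def jumis(s = 2):
-- 	o = []
-- 	for i in range(0, 0 + s * 3):
-- 		o.append([e] * (17 + (8 * (s - 2))))
-- 	for i in range(0, len(o)):
-- 		o[len(o) - i - 1][2 + i * 2] = f
-- 		o[len(o)-i-1][(17 + (8 * (s - 2)))-3-(i*2)] = f
-- 	for i in range(0, s + 1):
-- 		o[s + 1 - i - 1][2 + i * 2-2] = f
-- 		o[s + 1 - i - 1][(17 + (8 * (s - 2))) - (i * 2) - 1] = f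
-- 	o2 = []
--
-- 	for i in o:
-- 		o2.append('')
-- 		for c in i:
-- 			o2[len(o2) - 1] += c
-- 	return o2
-- ===== SOURCE B (Python) =====
-- f = '#'
--
-- e = ' '
--
-- def jumis(s = 2):
--     # Run-length construction: each row is described by its sorted set of mark
--     # columns (computed in closed form) and rendered as space runs joined by '#';
--     # no character grid is ever built.
--     out = []
--     for r in range(3 * s):
--         if r <= s:
--             cols = {6 * s - 2 * r, 2 * s + 2 * r, 2 * s - 2 * r, 6 * s + 2 * r}
--         else:
--             cols = {6 * s - 2 * r, 2 * s + 2 * r}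
--         row = ''
--         prev = -1
--         for c in sorted(cols):
--             row += e * (c - prev - 1) + f
--             prev = c
--         out.append(row + e * (8 * s - prev))
--     return out
-- ===== Notes on version B (the rewrite author's own statement) =====
-- stated objective: faster
-- what changed: B never builds a character grid: each row is described by its (sorted) set of mark columns computed in closed form and rendered as run-length space segments joined with '#', whereas A scatter-writes '#' into a shared mutable 2D list grid with two index loops and then flattens it char by char.
-- crash fix: On s = 0 A raises IndexError (its third loop indexes row 0 of an empty grid) while B returns []. — e.g. on jumis(0): A raises IndexError, B returns []
import Mathlib
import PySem

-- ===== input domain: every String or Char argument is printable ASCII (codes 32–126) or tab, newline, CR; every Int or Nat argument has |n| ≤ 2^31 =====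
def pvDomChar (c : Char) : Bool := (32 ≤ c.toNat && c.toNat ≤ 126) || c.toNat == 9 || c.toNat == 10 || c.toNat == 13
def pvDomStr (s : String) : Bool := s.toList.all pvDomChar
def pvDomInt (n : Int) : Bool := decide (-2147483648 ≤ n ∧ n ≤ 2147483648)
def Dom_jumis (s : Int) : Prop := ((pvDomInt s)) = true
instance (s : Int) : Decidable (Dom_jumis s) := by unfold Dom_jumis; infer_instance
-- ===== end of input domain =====

-- B renders each row from its closed-form sorted set of mark columns as run-length space
-- segments (no character grid), instead of A's scatter-written mutable 2D grid.

-- ===== PORT A =====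
-- o[r][c] = '#'  (in-range under Pre_; pyGetD/pySetD totalised forms, exact where Python does not raise)
def pySet2 (o : List (List Char)) (r c : Int) : List (List Char) :=
  PySem.List.pySetD o r (PySem.List.pySetD (PySem.List.pyGetD o r []) c '#')

def jumis (s : Int) : List String :=
  let w : Int := 17 + 8 * (s - 2)
  -- first loop: o.append([e] * w)
  let o0 : List (List Char) :=
    (PySem.List.pyRange 0 (0 + s * 3) 1).foldl
      (fun o _ => o ++ [PySem.List.pyRepeat [' '] w]) []
  -- second loop
  let o1 : List (List Char) :=
    (PySem.List.pyRange 0 o0.length 1).foldl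
      (fun o i =>
        let o := pySet2 o (PySem.List.len o - i - 1) (2 + i * 2)
        pySet2 o (PySem.List.len o - i - 1) (w - 3 - (i * 2))) o0
  -- third loop
  let o2 : List (List Char) :=
    (PySem.List.pyRange 0 (s + 1) 1).foldl
      (fun o i =>
        let o := pySet2 o (s + 1 - i - 1) (2 + i * 2 - 2)
        pySet2 o (s + 1 - i - 1) (w - (i * 2) - 1)) o1
  -- final loop: strings built char by char
  o2.foldl (fun out row =>
    out ++ [String.mk (row.foldl (fun acc c => acc ++ [c]) [])]) []

-- ===== PORT B =====
def jumis_alt (s : Int) : List String :=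
  (PySem.List.pyRange 0 (3 * s) 1).map (fun r =>
    let cols : PySem.Set Int :=
      if r ≤ s then
        PySem.Set.ofList [6 * s - 2 * r, 2 * s + 2 * r, 2 * s - 2 * r, 6 * s + 2 * r]
      else
        PySem.Set.ofList [6 * s - 2 * r, 2 * s + 2 * r]
    let st := (PySem.List.sorted cols (fun x => x) false).foldl
      (fun (st : List Char × Int) c =>
        (st.1 ++ PySem.List.pyRepeat [' '] (c - st.2 - 1) ++ ['#'], c)) ([], -1)
    String.mk (st.1 ++ PySem.List.pyRepeat [' '] (8 * s - st.2)))

-- ===== PRECONDITION & SPEC =====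
-- Pre_ excludes only s = 0, on which A raises IndexError (its third loop indexes row 0 of the empty grid).
def Pre_jumis (s : Int) : Prop := s ≠ 0
instance (s : Int) : Decidable (Pre_jumis s) := by unfold Pre_jumis; infer_instance
def pvWitness_jumis : Int := 2

-- On s = 0 A raises IndexError while B returns [].
def Raises_jumis (s : Int) : Prop := s = 0
instance (s : Int) : Decidable (Raises_jumis s) := by unfold Raises_jumis; infer_instance
def pvRaiseWitness_jumis : Int := 0
def pvRaiseWitnessOut_jumis : List String := []

def Spec_jumis (s : Int) (out : List String) : Prop := out = jumis_alt s
instance (s : Int) (out : List String) : Decidable (Spec_jumis s out) := by unfold Spec_jumis; infer_instance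

-- ===== CLAIM (what is proved, stated in full; the proofs are below) =====
def Claim_equal_jumis : Prop := ∀ (s : Int), Dom_jumis s → Pre_jumis s → Spec_jumis s (jumis s)
def Claim_raises_jumis : Prop := (∀ (s : Int), Dom_jumis s → Raises_jumis s → ¬ Pre_jumis s) ∧ (Dom_jumis (pvRaiseWitness_jumis) ∧ Raises_jumis (pvRaiseWitness_jumis) ∧ jumis_alt (pvRaiseWitness_jumis) = pvRaiseWitnessOut_jumis)

-- ===== LEMMAS AND PROOFS =====

lemma find?_pyRange_eq_none (p : Int → Bool) (a b : Int)
    (h : ∀ i, a ≤ i → i < b → p i = false) :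
    (PySem.List.pyRange a b 1).find? p = none := by
  rw [List.find?_eq_none]
  intro x hx
  rw [PySem.List.mem_pyRange_one] at hx
  simp [h x hx.1 hx.2]

lemma find?_pyRange_eq_some (p : Int → Bool) (b i0 : Int)
    (hb : i0 < b) (hp : p i0 = true) :
    ∀ a : Int, a ≤ i0 → (∀ i, a ≤ i → i < i0 → p i = false) →
    (PySem.List.pyRange a b 1).find? p = some i0 := by
  intro a ha hmin
  obtain ⟨n, hn⟩ : ∃ n : Nat, (i0 - a).toNat = n := ⟨_, rfl⟩
  induction n generalizing a with
  | zero =>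
    have : a = i0 := by omega
    subst this
    rw [PySem.List.pyRange_one_cons (by omega)]
    rw [List.find?_cons_of_pos hp]
  | succ n ih =>
    have hlt : a < i0 := by omega
    rw [PySem.List.pyRange_one_cons (by omega)]
    rw [List.find?_cons_of_neg (by simp [hmin a le_rfl hlt])]
    exact ih (a + 1) (by omega) (fun i h1 h2 => hmin i (by omega) h2) (by omega)

lemma fold_rows (N : Nat) (ρ : Int → Int) (F : Int → List Char → List Char)
    (st : List (List Char) → Int → List (List Char)) :
    ∀ (L : List Int) (o : List (List Char)),
      o.length = N →
      (∀ (o' : List (List Char)) (i : Int), o'.length = N → i ∈ L →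
        st o' i = PySem.List.pySetD o' (ρ i) (F i (PySem.List.pyGetD o' (ρ i) []))) →
      (∀ i ∈ L, 0 ≤ ρ i ∧ ρ i < (N : Int)) →
      L.Pairwise (fun i j => ρ i ≠ ρ j) →
      (L.foldl st o).length = N ∧
      ∀ k : Nat, (L.foldl st o)[k]? =
        (match L.find? (fun i => ρ i == (k : Int)) with
         | some i => (o[k]?).map (F i)
         | none => o[k]?) := by
  intro L
  induction L with
  | nil => intro o hlen _ _ _; exact ⟨hlen, fun k => by simp⟩
  | cons i L ih =>
    intro o hlen hst hrange hpw
    obtain ⟨hpw1, hpw2⟩ := List.pairwise_cons.mp hpw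
    obtain ⟨h0, h1⟩ := hrange i (List.mem_cons_self ..)
    have hio : (ρ i).toNat < o.length := by omega
    have hstep : st o i = o.set (ρ i).toNat (F i (o[(ρ i).toNat]'hio)) := by
      rw [hst o i hlen (List.mem_cons_self ..),
          PySem.List.pyGetD_eq_getElem o [] h0 (by rw [hlen]; exact h1),
          PySem.List.pySetD_of_nonneg _ _ h0]
    have hlen' : (st o i).length = N := by rw [hstep]; simp [hlen]
    obtain ⟨ihl, ihk⟩ := ih (st o i) hlen'
      (fun o' j ho hj => hst o' j ho (List.mem_cons_of_mem _ hj))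
      (fun j hj => hrange j (List.mem_cons_of_mem _ hj)) hpw2
    refine ⟨by simpa using ihl, fun k => ?_⟩
    rw [List.foldl_cons]
    by_cases hc : ρ i = (k : Int)
    · have hkN : k < N := by omega
      have hkk : (ρ i).toNat = k := by omega
      rw [List.find?_cons_of_pos (by simp [hc]), ihk k]
      have hnone : L.find? (fun j => ρ j == (k : Int)) = none :=
        List.find?_eq_none.mpr (fun j hj => by
          simp only [beq_iff_eq]
          intro e
          exact hpw1 j hj (by omega))
      rw [hnone, hstep]
      simp only [hkk]
      rw [List.getElem?_set_self (by omega), List.getElem?_eq_getElem (by omega : k < o.length)]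
      simp
    · rw [List.find?_cons_of_neg (by simp [hc]), ihk k]
      have hset : (st o i)[k]? = o[k]? := by
        rw [hstep]; exact List.getElem?_set_ne (by omega)
      rcases hfind : L.find? (fun j => ρ j == (k : Int)) with _ | j <;> simp [hset]

lemma pySet2_canon (o : List (List Char)) (r c : Int) (h0 : 0 ≤ r) :
    pySet2 o r c = o.set r.toNat (PySem.List.pySetD (PySem.List.pyGetD o r []) c '#') := by
  unfold pySet2; rw [PySem.List.pySetD_of_nonneg _ _ h0]

lemma pySet2_pySet2 (o : List (List Char)) (r c1 c2 : Int) (h0 : 0 ≤ r) (h1 : r < (o.length : Int)) :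
    pySet2 (pySet2 o r c1) r c2 =
    PySem.List.pySetD o r
      (PySem.List.pySetD (PySem.List.pySetD (PySem.List.pyGetD o r []) c1 '#') c2 '#') := by
  have hr : r.toNat < o.length := by omega
  rw [pySet2_canon o r c1 h0, pySet2_canon _ r c2 h0, PySem.List.pySetD_of_nonneg _ _ h0,
      List.set_set]
  congr 1
  rw [PySem.List.pyGetD_eq_getElem _ [] h0 (by simp; omega)]
  simp

lemma length_pySet2 (o : List (List Char)) (r c : Int) (h0 : 0 ≤ r) :
    (pySet2 o r c).length = o.length := by
  rw [pySet2_canon o r c h0]; simp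

-- B-side: recursive description of one run-length row (space runs joined by '#', then a tail run)
def segRow (m : Int) : Int → List Int → List Char
  | prev, [] => List.replicate (m - prev).toNat ' '
  | prev, c :: rest => List.replicate (c - prev - 1).toNat ' ' ++ '#' :: segRow m c rest

-- B's fold over the sorted columns, plus its tail of spaces, is segRow
lemma segFold (m : Int) (L : List Int) : ∀ (acc : List Char) (prev : Int),
    (L.foldl (fun (st : List Char × Int) c =>
        (st.1 ++ List.replicate (c - st.2 - 1).toNat ' ' ++ ['#'], c)) (acc, prev)).1
      ++ List.replicate (m -
        (L.foldl (fun (st : List Char × Int) c =>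
          (st.1 ++ List.replicate (c - st.2 - 1).toNat ' ' ++ ['#'], c)) (acc, prev)).2).toNat ' '
    = acc ++ segRow m prev L := by
  induction L with
  | nil => intro acc prev; simp [segRow]
  | cons c rest ih =>
    intro acc prev
    rw [List.foldl_cons]
    rw [ih (acc ++ List.replicate (c - prev - 1).toNat ' ' ++ ['#']) c]
    simp [segRow]

-- pointwise description of segRow for a strictly increasing in-range column list
lemma segRow_eq_map (m : Int) : ∀ (L : List Int) (prev : Int),
    L.Pairwise (· < ·) → (∀ c ∈ L, prev < c ∧ c ≤ m) → prev ≤ m →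
    segRow m prev L =
      (List.range (m - prev).toNat).map
        (fun (j : Nat) => if (prev + 1 + (j : Int)) ∈ L then '#' else ' ') := by
  intro L
  induction L with
  | nil =>
    intro prev _ _ _
    simp only [segRow, List.not_mem_nil, if_false]
    rw [List.map_const', List.length_range]
  | cons c rest ih =>
    intro prev hpw hmem hpm
    obtain ⟨hp1, hp2⟩ := List.pairwise_cons.mp hpw
    obtain ⟨hc1, hc2⟩ := hmem c (List.mem_cons_self ..)
    have ha : (m - prev).toNat = ((c - prev - 1).toNat + 1) + (m - c).toNat := by omega
    rw [segRow, ha, List.range_add, List.map_append, List.range_succ, List.map_append,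
        List.map_map]
    have e1 : List.map (fun (j : Nat) => if prev + 1 + (j : Int) ∈ c :: rest then '#' else ' ')
        (List.range (c - prev - 1).toNat) = List.replicate (c - prev - 1).toNat ' ' := by
      rw [show List.replicate (c - prev - 1).toNat ' '
            = List.map (fun (_ : Nat) => ' ') (List.range (c - prev - 1).toNat) from by
          rw [List.map_const', List.length_range]]
      apply List.map_congr_left
      intro j hj
      rw [List.mem_range] at hj
      have hne : prev + 1 + (j : Int) ∉ c :: rest := by
        intro hmemc
        rcases List.mem_cons.mp hmemc with h | h
        · omega
        · have := hp1 _ h; omega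
      simp [hne]
    have e2 : List.map (fun (j : Nat) => if prev + 1 + (j : Int) ∈ c :: rest then '#' else ' ')
        [(c - prev - 1).toNat] = ['#'] := by
      have hc' : prev + 1 + (((c - prev - 1).toNat : Nat) : Int) = c := by omega
      simp only [List.map_cons, List.map_nil, hc']
      simp
    have e3 : List.map ((fun (j : Nat) => if prev + 1 + (j : Int) ∈ c :: rest then '#' else ' ')
          ∘ (fun x => (c - prev - 1).toNat + 1 + x)) (List.range (m - c).toNat)
        = List.map (fun (j : Nat) => if c + 1 + (j : Int) ∈ rest then '#' else ' ')
            (List.range (m - c).toNat) := by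
      apply List.map_congr_left
      intro j hj
      have he : prev + 1 + (((c - prev - 1).toNat + 1 + j : Nat) : Int) = c + 1 + (j : Int) := by
        push_cast; omega
      simp only [Function.comp_apply, he]
      refine if_congr ?_ rfl rfl
      rw [List.mem_cons]
      constructor
      · rintro (h | h)
        · omega
        · exact h
      · exact Or.inr
    rw [e1, e2, e3, ih c hp2 (fun x hx => ⟨hp1 x hx, (hmem x (List.mem_cons_of_mem _ hx)).2⟩) hc2]
    simp

-- A-side: a left fold of in-range pySetD marks over a mapped range, pointwise
lemma setFold_map (w : Nat) : ∀ (cs : List Int) (g : Nat → Char),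
    (∀ c ∈ cs, 0 ≤ c ∧ c < (w : Int)) →
    cs.foldl (fun row c => PySem.List.pySetD row c '#') ((List.range w).map g)
      = (List.range w).map (fun (j : Nat) => if ((j : Int) ∈ cs) then '#' else g j) := by
  intro cs
  induction cs with
  | nil => intro g _; simp
  | cons c rest ih =>
    intro g hb
    obtain ⟨hc0, hcw⟩ := hb c (List.mem_cons_self ..)
    rw [List.foldl_cons]
    have hset : PySem.List.pySetD ((List.range w).map g) c '#'
        = (List.range w).map (fun (j : Nat) => if (j : Int) = c then '#' else g j) := by
      rw [PySem.List.pySetD_of_nonneg _ _ hc0]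
      apply List.ext_getElem
      · simp
      · intro i h1 h2
        rw [List.getElem_set]
        simp only [List.getElem_map, List.getElem_range]
        have hi : i < w := by simpa using h2
        split_ifs with e1 e2 e2 <;> first | rfl | omega
    rw [hset, ih _ (fun x hx => hb x (List.mem_cons_of_mem _ hx))]
    apply List.map_congr_left
    intro j _
    by_cases h1 : (j : Int) ∈ rest <;> by_cases h2 : (j : Int) = c <;>
      simp [List.mem_cons, h1, h2]

-- the whole equivalence, on Pre_ (s ≠ 0)
lemma jumis_eq_alt : ∀ s : Int, s ≠ 0 → jumis s = jumis_alt s := by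
  intro s hs
  rcases lt_or_gt_of_ne hs with hneg | hpos
  · have h1 : PySem.List.pyRange 0 (0 + s * 3) 1 = [] := PySem.List.pyRange_one_eq_nil (by omega)
    have h2 : PySem.List.pyRange 0 (s + 1) 1 = [] := PySem.List.pyRange_one_eq_nil (by omega)
    have h3 : PySem.List.pyRange 0 (3 * s) 1 = [] := PySem.List.pyRange_one_eq_nil (by omega)
    have h5 : (s * 3).toNat = 0 := by omega
    simp [jumis, jumis_alt, h2, h3, h5]
  · simp only [jumis, jumis_alt, PySem.List.foldl_append_singleton_eq_map,
      List.nil_append, PySem.List.len_eq,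
      List.map_const', PySem.List.length_pyRange_one, PySem.List.pyRepeat_singleton,
      List.map_id', List.length_replicate]
    rw [show (((0 + s * 3 - 0).toNat : Nat) : Int) = ((0 + s * 3 - 0).toNat : Nat) from rfl]
    set N : Nat := (0 + s * 3 - 0).toNat with hNdef
    have hNi : (N : Int) = s * 3 := by omega
    set base : List Char := List.replicate (17 + 8 * (s - 2)).toNat ' ' with hbase
    set o0 : List (List Char) := List.replicate N base with ho0
    -- loop 1 canonicalised
    obtain ⟨hlen1, hget1⟩ := fold_rows N (fun i => (N : Int) - i - 1)
      (fun i row => PySem.List.pySetD (PySem.List.pySetD row (2 + i * 2) '#')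
        (17 + 8 * (s - 2) - 3 - i * 2) '#')
      (fun o i => pySet2 (pySet2 o ((o.length : Int) - i - 1) (2 + i * 2))
        (((pySet2 o ((o.length : Int) - i - 1) (2 + i * 2)).length : Int) - i - 1)
        (17 + 8 * (s - 2) - 3 - i * 2))
      (PySem.List.pyRange 0 (N : Int) 1) o0 (by simp [ho0])
      (fun o' i ho' hi => by
        obtain ⟨hi0, hi1⟩ := (PySem.List.mem_pyRange_one).mp hi
        have h0 : (0:Int) ≤ (N : Int) - i - 1 := by omega
        have hL : ((pySet2 o' ((o'.length : Int) - i - 1) (2 + i * 2)).length : Int) = (o'.length : Int) := by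
          rw [length_pySet2 _ _ _ (by rw [ho']; omega)]
        simp only []
        rw [hL, ho']
        exact pySet2_pySet2 o' ((N:Int) - i - 1) (2 + i * 2) (17 + 8 * (s - 2) - 3 - i * 2) h0 (by rw [ho']; omega))
      (fun i hi => by
        obtain ⟨hi0, hi1⟩ := (PySem.List.mem_pyRange_one).mp hi
        simp only []
        omega)
      ((PySem.List.pairwise_lt_pyRange_one 0 (N:Int)).imp (by intro a b h; simp only []; omega))
    -- loop 2 canonicalised
    obtain ⟨hlen2, hget2⟩ := fold_rows N (fun i => s + 1 - i - 1)
      (fun i row => PySem.List.pySetD (PySem.List.pySetD row (2 + i * 2 - 2) '#')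
        (17 + 8 * (s - 2) - i * 2 - 1) '#')
      (fun o i => pySet2 (pySet2 o (s + 1 - i - 1) (2 + i * 2 - 2)) (s + 1 - i - 1)
        (17 + 8 * (s - 2) - i * 2 - 1))
      (PySem.List.pyRange 0 (s + 1) 1) _ hlen1
      (fun o' i ho' hi => by
        obtain ⟨hi0, hi1⟩ := (PySem.List.mem_pyRange_one).mp hi
        simp only []
        exact pySet2_pySet2 o' (s + 1 - i - 1) (2 + i * 2 - 2) (17 + 8 * (s - 2) - i * 2 - 1)
          (by omega) (by rw [ho']; omega))
      (fun i hi => by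
        obtain ⟨hi0, hi1⟩ := (PySem.List.mem_pyRange_one).mp hi
        simp only []
        omega)
      ((PySem.List.pairwise_lt_pyRange_one 0 (s+1)).imp (by intro a b h; simp only []; omega))
    apply List.ext_getElem?
    intro k
    rw [List.getElem?_map, List.getElem?_map]
    by_cases hk : k < N
    · rw [hget2 k]
      have ho0k : o0[k]? = some base := by
        rw [ho0]; simp [hk]
      have hf1 : List.find? (fun i => (N : Int) - i - 1 == (k : Int)) (PySem.List.pyRange 0 (N : Int) 1)
          = some ((N : Int) - 1 - (k : Int)) :=
        find?_pyRange_eq_some _ _ _ (by omega) (by simp only [beq_iff_eq]; omega) 0 (by omega)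
          (fun i h1 h2 => by simp only [beq_eq_false_iff_ne]; omega)
      have hR : (PySem.List.pyRange 0 (3 * s) 1)[k]? = some ((0 : Int) + (k : Int)) := by
        rw [PySem.List.getElem?_pyRange_one]
        simp
        omega
      -- base as a mapped range
      have hbase2 : base = (List.range (8 * s + 1).toNat).map (fun _ => ' ') := by
        rw [List.map_const', List.length_range, hbase]
        congr 1
        omega
      by_cases hks : (k : Int) ≤ s
      · have hf2 : List.find? (fun i => s + 1 - i - 1 == (k : Int)) (PySem.List.pyRange 0 (s + 1) 1)
            = some (s - (k : Int)) :=
          find?_pyRange_eq_some _ _ _ (by omega) (by simp only [beq_iff_eq]; omega) 0 (by omega)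
            (fun i h1 h2 => by simp only [beq_eq_false_iff_ne]; omega)
        rw [hf2]
        simp only [hget1 k, hf1, ho0k, Option.map_some, hR]
        rw [if_pos (by omega : (0 : Int) + (k : Int) ≤ s)]
        refine congrArg some (congrArg String.mk ?_)
        -- B side: run-length fold → segRow → pointwise map
        rw [segFold (8 * s)
              (PySem.List.sorted (PySem.Set.ofList
                [6 * s - 2 * (0 + (k:Int)), 2 * s + 2 * (0 + (k:Int)),
                 2 * s - 2 * (0 + (k:Int)), 6 * s + 2 * (0 + (k:Int))]) (fun x => x) false) [] (-1),
            List.nil_append]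
        rw [segRow_eq_map (8 * s) _ (-1)
              (PySem.List.sorted_ofList_pairwise_lt _)
              (fun c hc => by
                rw [PySem.List.mem_sorted, PySem.Set.mem_ofList] at hc
                simp only [List.mem_cons, List.not_mem_nil, or_false] at hc
                omega)
              (by omega)]
        -- A side: mark fold over the blank mapped row
        have hA := setFold_map (8 * s + 1).toNat
          [2 + ((N : Int) - 1 - (k:Int)) * 2, 17 + 8 * (s - 2) - 3 - ((N : Int) - 1 - (k:Int)) * 2,
           2 + (s - (k:Int)) * 2 - 2, 17 + 8 * (s - 2) - (s - (k:Int)) * 2 - 1]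
          (fun _ => ' ')
          (fun c hc => by
            simp only [List.mem_cons, List.not_mem_nil, or_false] at hc
            omega)
        simp only [List.foldl_cons, List.foldl_nil] at hA
        rw [hbase2, hA]
        rw [show ((8 * s : Int) - (-1)).toNat = (8 * s + 1).toNat from by omega]
        apply List.map_congr_left
        intro j hj
        rw [List.mem_range] at hj
        refine if_congr ?_ rfl rfl
        rw [PySem.List.mem_sorted, PySem.Set.mem_ofList]
        simp only [List.mem_cons, List.not_mem_nil, or_false]
        constructor <;> intro h <;> omega
      · have hf2 : List.find? (fun i => s + 1 - i - 1 == (k : Int)) (PySem.List.pyRange 0 (s + 1) 1)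
            = none :=
          find?_pyRange_eq_none _ _ _ (fun i h1 h2 => by simp only [beq_eq_false_iff_ne]; omega)
        rw [hf2]
        simp only [hget1 k, hf1, ho0k, Option.map_some, hR]
        rw [if_neg (by omega : ¬ ((0 : Int) + (k : Int) ≤ s))]
        refine congrArg some (congrArg String.mk ?_)
        rw [segFold (8 * s)
              (PySem.List.sorted (PySem.Set.ofList
                [6 * s - 2 * (0 + (k:Int)), 2 * s + 2 * (0 + (k:Int))]) (fun x => x) false) [] (-1),
            List.nil_append]
        rw [segRow_eq_map (8 * s) _ (-1)
              (PySem.List.sorted_ofList_pairwise_lt _)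
              (fun c hc => by
                rw [PySem.List.mem_sorted, PySem.Set.mem_ofList] at hc
                simp only [List.mem_cons, List.not_mem_nil, or_false] at hc
                omega)
              (by omega)]
        have hA := setFold_map (8 * s + 1).toNat
          [2 + ((N : Int) - 1 - (k:Int)) * 2, 17 + 8 * (s - 2) - 3 - ((N : Int) - 1 - (k:Int)) * 2]
          (fun _ => ' ')
          (fun c hc => by
            simp only [List.mem_cons, List.not_mem_nil, or_false] at hc
            omega)
        simp only [List.foldl_cons, List.foldl_nil] at hA
        rw [hbase2, hA]
        rw [show ((8 * s : Int) - (-1)).toNat = (8 * s + 1).toNat from by omega]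
        apply List.map_congr_left
        intro j hj
        rw [List.mem_range] at hj
        refine if_congr ?_ rfl rfl
        rw [PySem.List.mem_sorted, PySem.Set.mem_ofList]
        simp only [List.mem_cons, List.not_mem_nil, or_false]
        constructor <;> intro h <;> omega
    · rw [List.getElem?_eq_none (by rw [hlen2]; omega),
          List.getElem?_eq_none (by rw [PySem.List.length_pyRange_one]; omega)]
      rfl

-- ===== VERDICT (by name: the statement is the Claim_ definition above) =====
theorem jumis_spec : Claim_equal_jumis := by
  intro s _ hp
  exact jumis_eq_alt s hp

def jumis_raises : Claim_raises_jumis := by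
  unfold Claim_raises_jumis
  exact ⟨by intro s _ h hp; exact hp h, by decide⟩
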